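-- pv_equiv track=rewrite | github.com/Ag3497120/verantyx-v6 | arc/world_commands.py | sym_diag_main
-- ===== SOURCE A (Python) =====
-- from collections import Counter, defaultdict
--
-- def _bg(g):
--     c = Counter()
--     for row in g: c.update(row)
--     return c.most_common(1)[0][0]
--
-- def _copy(g):
--     return [row[:] for row in g]
--
-- def sym_diag_main(g):
--     bg=_bg(g); h,w=len(g),len(g[0])
--     if h!=w: return g
--     res=_copy(g)
--     for r in range(h):
--         for c in range(r+1,w):
--             if res[r][c]==bg and res[c][r]!=bg: res[r][c]=res[c][r]
--             elif res[c][r]==bg and res[r][c]!=bg: res[c][r]=res[r][c]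
--     return res
-- ===== SOURCE B (Python) =====
-- from collections import Counter
--
-- def _bg(g):
--     c = Counter()
--     for row in g: c.update(row)
--     return c.most_common(1)[0][0]
--
-- def sym_diag_main(g):
--     bg = _bg(g)
--     h, w = len(g), len(g[0])
--     if h != w:
--         return g
--     return [[g[r][c] if g[r][c] != bg else g[c][r] for c in range(w)] for r in range(h)]
-- ===== Notes on version B (the rewrite author's own statement) =====
-- stated objective: simpler
-- what changed: Instead of copying the grid and reconciling the two cells of each upper-triangle pair by in-place mutation, B builds the whole result in one comprehension where every cell is computed independently as g[r][c] if it is not background else its mirror g[c][r].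
-- outside the precondition, e.g. on sym_diag_main([[1, 2], [3]]): A returns [[1, 2], [3]], B raises IndexError
import Mathlib
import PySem

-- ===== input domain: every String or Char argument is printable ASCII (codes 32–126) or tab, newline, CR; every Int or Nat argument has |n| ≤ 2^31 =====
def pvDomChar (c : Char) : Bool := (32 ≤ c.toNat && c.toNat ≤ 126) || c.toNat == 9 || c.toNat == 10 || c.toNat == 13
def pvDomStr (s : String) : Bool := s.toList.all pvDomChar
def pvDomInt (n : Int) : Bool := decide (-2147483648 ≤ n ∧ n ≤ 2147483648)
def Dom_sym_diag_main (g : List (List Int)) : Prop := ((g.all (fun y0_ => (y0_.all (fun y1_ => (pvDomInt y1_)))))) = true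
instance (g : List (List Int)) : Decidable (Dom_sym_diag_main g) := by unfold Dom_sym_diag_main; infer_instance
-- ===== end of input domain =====

-- B (objective: simpler) builds the whole result in one pass, each cell computed independently
-- as g[r][c]-or-its-mirror, instead of A's copy-then-mutate reconciliation of upper-triangle pairs.

-- ===== PORT A =====
-- _bg: Counter over all rows, then most_common(1)[0][0] (first-inserted key of maximal count);
-- Source B keeps this helper verbatim, so the definition is shared by both ports.
def pvBg (g : List (List Int)) : Int :=
  let c : PySem.Dict Int Int :=
    g.foldl (fun c row => row.foldl (fun c x => c.modify x 0 (· + 1)) c) PySem.Dict.empty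
  ((PySem.List.sorted c.items (fun kv => kv.2) true).headD (0, 0)).1

-- res[i][j] read; total form of the Python indexing, exact under Pre_ (indices in range)
def pvGet2 (g : List (List Int)) (i j : Int) : Int :=
  PySem.List.pyGetD (PySem.List.pyGetD g i []) j 0

-- res[i][j] = v
def pvSet2 (g : List (List Int)) (i j : Int) (v : Int) : List (List Int) :=
  PySem.List.pySetD g i (PySem.List.pySetD (PySem.List.pyGetD g i []) j v)

-- A's loop body for one (r, c)
def pvStep (bg : Int) (res : List (List Int)) (r c : Int) : List (List Int) :=
  if pvGet2 res r c = bg ∧ pvGet2 res c r ≠ bg then pvSet2 res r c (pvGet2 res c r)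
  else if pvGet2 res c r = bg ∧ pvGet2 res r c ≠ bg then pvSet2 res c r (pvGet2 res r c)
  else res

def sym_diag_main (g : List (List Int)) : List (List Int) :=
  let bg := pvBg g
  let h : Int := PySem.List.len g
  let w : Int := PySem.List.len (g.headD [])   -- len(g[0]); Pre_ gives g ≠ []
  if h ≠ w then g
  else
    let res := g.map (fun row => PySem.List.slice row none none)   -- _copy: [row[:] for row in g]
    (PySem.List.pyRange 0 h 1).foldl
      (fun res r => (PySem.List.pyRange (r + 1) w 1).foldl (fun res c => pvStep bg res r c) res) res

-- ===== PORT B =====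
def sym_diag_main_alt (g : List (List Int)) : List (List Int) :=
  let bg := pvBg g
  let h : Int := PySem.List.len g
  let w : Int := PySem.List.len (g.headD [])
  if h ≠ w then g
  else
    (PySem.List.pyRange 0 h 1).map (fun r =>
      (PySem.List.pyRange 0 w 1).map (fun c =>
        if pvGet2 g r c ≠ bg then pvGet2 g r c else pvGet2 g c r))

-- ===== PRECONDITION & SPEC =====
-- Pre_ excludes: empty g and all-rows-empty g, on which A raises IndexError (g[0] / most_common
-- of an empty Counter), and ragged grids with len(g) == len(g[0]), on which A's triangular scan
-- may happen to stay in bounds and return while any full-grid pass raises IndexError.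
def Pre_sym_diag_main (g : List (List Int)) : Prop :=
  g ≠ [] ∧ (∃ row ∈ g, row ≠ []) ∧
    (g.length = (g.headD []).length → ∀ row ∈ g, row.length = g.length)
instance (g : List (List Int)) : Decidable (Pre_sym_diag_main g) := by
  unfold Pre_sym_diag_main; infer_instance

def pvWitness_sym_diag_main : List (List Int) := [[1, 0], [0, 2]]

def Spec_sym_diag_main (g : List (List Int)) (out : List (List Int)) : Prop := out = sym_diag_main_alt g
instance (g : List (List Int)) (out : List (List Int)) : Decidable (Spec_sym_diag_main g out) := by unfold Spec_sym_diag_main; infer_instance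

-- ===== CLAIM (what is proved, stated in full; the proofs are below) =====
def Claim_equal_sym_diag_main : Prop := ∀ (g : List (List Int)), Dom_sym_diag_main g → Pre_sym_diag_main g → Spec_sym_diag_main g (sym_diag_main g)

-- ===== LEMMAS AND PROOFS =====

-- Nat-indexed views of the grid operations (the ranges produce non-negative indices)
def pvG (g : List (List Int)) (i j : Nat) : Int := (g.getD i []).getD j 0
def pvS (g : List (List Int)) (i j : Nat) (v : Int) : List (List Int) :=
  g.set i ((g.getD i []).set j v)
def pvStepN (bg : Int) (res : List (List Int)) (r c : Nat) : List (List Int) :=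
  if pvG res r c = bg ∧ pvG res c r ≠ bg then pvS res r c (pvG res c r)
  else if pvG res c r = bg ∧ pvG res r c ≠ bg then pvS res c r (pvG res r c)
  else res
-- the common per-cell result of both programs
def pvF (bg : Int) (g : List (List Int)) (i j : Nat) : Int :=
  if pvG g i j = bg ∧ pvG g j i ≠ bg then pvG g j i else pvG g i j
def pvShape (n : Nat) (res : List (List Int)) : Prop :=
  res.length = n ∧ ∀ k, k < n → (res.getD k []).length = n
def pvFold (bg : Int) (res : List (List Int)) (ps : List (Nat × Nat)) : List (List Int) :=
  ps.foldl (fun res p => pvStepN bg res p.1 p.2) res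
def pvPairs (n : Nat) : List (Nat × Nat) :=
  (List.range n).flatMap (fun r => (List.range (n - (r + 1))).map (fun k => (r, r + 1 + k)))

theorem pvStep_cast (bg : Int) (res : List (List Int)) (r c : Nat) :
    pvStep bg res (r : Int) (c : Int) = pvStepN bg res r c := by
  simp [pvStep, pvStepN, pvGet2, pvSet2, pvG, pvS]

theorem pvGet2_cast (g : List (List Int)) (i j : Nat) :
    pvGet2 g (i : Int) (j : Int) = pvG g i j := by
  simp [pvGet2, pvG]

theorem pvGetD_set {α : Type} (l : List α) (a k : Nat) (x d : α) :
    (l.set a x).getD k d = if k = a ∧ a < l.length then x else l.getD k d := by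
  rw [List.getD_eq_getElem?_getD, List.getD_eq_getElem?_getD, List.getElem?_set]
  split_ifs with h1 h2 h3 <;> simp_all

theorem pvG_pvS (res : List (List Int)) (a b i j : Nat) (v : Int)
    (ha : a < res.length) (hb : b < (res.getD a []).length) :
    pvG (pvS res a b v) i j = if i = a ∧ j = b then v else pvG res i j := by
  unfold pvG pvS
  rw [pvGetD_set]
  by_cases hia : i = a
  · subst hia
    simp only [ha, and_true, if_true]
    rw [pvGetD_set]
    simp only [hb, and_true, true_and]
  · simp [hia]

theorem pvShape_pvS {n : Nat} {res : List (List Int)} (h : pvShape n res)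
    (a b : Nat) (v : Int) : pvShape n (pvS res a b v) := by
  obtain ⟨h1, h2⟩ := h
  refine ⟨by simp [pvS, h1], fun k hk => ?_⟩
  rw [pvS, pvGetD_set]
  split_ifs with hc
  · simpa using h2 a (by omega)
  · exact h2 k hk

theorem pvShape_step {n : Nat} {res : List (List Int)} (h : pvShape n res)
    (bg : Int) (r c : Nat) : pvShape n (pvStepN bg res r c) := by
  unfold pvStepN
  split_ifs <;> first | exact pvShape_pvS h _ _ _ | exact h

theorem pvG_step_untouched {n : Nat} {res : List (List Int)} (h : pvShape n res)
    (bg : Int) (r c i j : Nat) (hr : r < n) (hc : c < n)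
    (h1 : ¬(i = r ∧ j = c)) (h2 : ¬(i = c ∧ j = r)) :
    pvG (pvStepN bg res r c) i j = pvG res i j := by
  obtain ⟨hl, hrow⟩ := h
  unfold pvStepN
  split_ifs with ha hb
  · rw [pvG_pvS _ _ _ _ _ _ (by omega) (by rw [hrow r hr]; omega), if_neg h1]
  · rw [pvG_pvS _ _ _ _ _ _ (by omega) (by rw [hrow c hc]; omega), if_neg h2]
  · rfl

theorem pvShape_fold {n : Nat} (bg : Int) (ps : List (Nat × Nat)) :
    ∀ res : List (List Int), pvShape n res → pvShape n (pvFold bg res ps) := by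
  induction ps with
  | nil => exact fun res h => h
  | cons p ps ih => exact fun res h => ih _ (pvShape_step h bg p.1 p.2)

theorem pvFold_untouched {n : Nat} (bg : Int) (ps : List (Nat × Nat))
    (hps : ∀ p ∈ ps, p.1 < p.2 ∧ p.2 < n) :
    ∀ res : List (List Int), pvShape n res →
      ∀ i j : Nat, (∀ p ∈ ps, ¬(i = p.1 ∧ j = p.2) ∧ ¬(i = p.2 ∧ j = p.1)) →
        pvG (pvFold bg res ps) i j = pvG res i j := by
  induction ps with
  | nil => exact fun res _ i j _ => rfl
  | cons q ps ih =>
    intro res h i j hnt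
    have hq := hps q (List.mem_cons_self)
    have step1 : pvG (pvStepN bg res q.1 q.2) i j = pvG res i j :=
      pvG_step_untouched h bg q.1 q.2 i j (by omega) hq.2
        (hnt q List.mem_cons_self).1 (hnt q List.mem_cons_self).2
    calc pvG (pvFold bg (pvStepN bg res q.1 q.2) ps) i j
        = pvG (pvStepN bg res q.1 q.2) i j :=
          ih (fun p hp => hps p (List.mem_cons_of_mem _ hp)) _
            (pvShape_step h bg q.1 q.2) i j
            (fun p hp => hnt p (List.mem_cons_of_mem _ hp))
      _ = pvG res i j := step1

theorem pvFold_main {n : Nat} (bg : Int) (g : List (List Int)) :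
    ∀ (ps : List (Nat × Nat)), (∀ p ∈ ps, p.1 < p.2 ∧ p.2 < n) → ps.Nodup →
    ∀ res : List (List Int), pvShape n res →
      (∀ p ∈ ps, pvG res p.1 p.2 = pvG g p.1 p.2 ∧ pvG res p.2 p.1 = pvG g p.2 p.1) →
      ∀ p ∈ ps, pvG (pvFold bg res ps) p.1 p.2 = pvF bg g p.1 p.2 ∧
                pvG (pvFold bg res ps) p.2 p.1 = pvF bg g p.2 p.1 := by
  intro ps
  induction ps with
  | nil => intro _ _ _ _ _ p hp; cases hp
  | cons q ps ih =>
    intro hps hnd res hsh hag p hp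
    have hq := hps q List.mem_cons_self
    have hagq := hag q List.mem_cons_self
    have hqn : q.1 < n := by omega
    have hsh' : pvShape n (pvStepN bg res q.1 q.2) := pvShape_step hsh bg q.1 q.2
    have hrow1 : (res.getD q.1 []).length = n := hsh.2 q.1 hqn
    have hrow2 : (res.getD q.2 []).length = n := hsh.2 q.2 hq.2
    -- effect of the head step on q's own two cells
    have key1 : pvG (pvStepN bg res q.1 q.2) q.1 q.2 = pvF bg g q.1 q.2 ∧
                pvG (pvStepN bg res q.1 q.2) q.2 q.1 = pvF bg g q.2 q.1 := by
      have hlen : res.length = n := hsh.1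
      unfold pvStepN
      rw [hagq.1, hagq.2]
      split_ifs with c1 c2
      · constructor
        · rw [pvG_pvS _ _ _ _ _ _ (by omega) (by rw [hrow1]; omega),
              if_pos ⟨rfl, rfl⟩, pvF, if_pos c1]
        · rw [pvG_pvS _ _ _ _ _ _ (by omega) (by rw [hrow1]; omega),
              if_neg (by omega), hagq.2, pvF, if_neg (fun h => h.2 c1.1)]
      · constructor
        · rw [pvG_pvS _ _ _ _ _ _ (by omega) (by rw [hrow2]; omega),
              if_neg (by omega), hagq.1, pvF, if_neg (fun h => c2.2 h.1)]
        · rw [pvG_pvS _ _ _ _ _ _ (by omega) (by rw [hrow2]; omega),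
              if_pos ⟨rfl, rfl⟩, pvF, if_pos c2]
      · exact ⟨by rw [hagq.1, pvF, if_neg c1], by rw [hagq.2, pvF, if_neg c2]⟩
    -- q's cells are untouched by the remaining pairs (Nodup)
    have hqnot : q ∉ ps := (List.nodup_cons.mp hnd).1
    have hdiseq : ∀ p' ∈ ps,
        (¬(q.1 = p'.1 ∧ q.2 = p'.2) ∧ ¬(q.1 = p'.2 ∧ q.2 = p'.1)) ∧
        (¬(q.2 = p'.1 ∧ q.1 = p'.2) ∧ ¬(q.2 = p'.2 ∧ q.1 = p'.1)) := by
      intro p' hp'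
      have hpo := hps p' (List.mem_cons_of_mem _ hp')
      have hne : p' ≠ q := fun h => hqnot (h ▸ hp')
      have hne' : ¬(p'.1 = q.1 ∧ p'.2 = q.2) := fun h => hne (Prod.ext h.1 h.2)
      refine ⟨⟨fun h => hne' ⟨h.1.symm, h.2.symm⟩, fun h => by omega⟩,
              ⟨fun h => by omega, fun h => hne' ⟨h.2.symm, h.1.symm⟩⟩⟩
    rcases List.mem_cons.mp hp with rfl | hpmem
    · have hu1 := pvFold_untouched bg ps
        (fun p' hp' => hps p' (List.mem_cons_of_mem _ hp')) _ hsh' p.1 p.2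
        (fun p' hp' => (hdiseq p' hp').1)
      have hu2 := pvFold_untouched bg ps
        (fun p' hp' => hps p' (List.mem_cons_of_mem _ hp')) _ hsh' p.2 p.1
        (fun p' hp' => (hdiseq p' hp').2)
      exact ⟨by rw [pvFold, List.foldl_cons, ← pvFold, hu1, key1.1],
             by rw [pvFold, List.foldl_cons, ← pvFold, hu2, key1.2]⟩
    · -- agreement survives the head step for the remaining pairs
      have hag' : ∀ p' ∈ ps, pvG (pvStepN bg res q.1 q.2) p'.1 p'.2 = pvG g p'.1 p'.2 ∧
                             pvG (pvStepN bg res q.1 q.2) p'.2 p'.1 = pvG g p'.2 p'.1 := by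
        intro p' hp'
        have hd := hdiseq p' hp'
        have h1 : ¬(p'.1 = q.1 ∧ p'.2 = q.2) := fun h => hd.1.1 ⟨h.1.symm, h.2.symm⟩
        have h2 : ¬(p'.1 = q.2 ∧ p'.2 = q.1) := fun h => hd.2.1 ⟨h.1.symm, h.2.symm⟩
        have h3 : ¬(p'.2 = q.1 ∧ p'.1 = q.2) := fun h => hd.1.2 ⟨h.1.symm, h.2.symm⟩
        have h4 : ¬(p'.2 = q.2 ∧ p'.1 = q.1) := fun h => hd.2.2 ⟨h.1.symm, h.2.symm⟩
        rw [pvG_step_untouched hsh bg q.1 q.2 p'.1 p'.2 hqn hq.2 h1 h2,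
            pvG_step_untouched hsh bg q.1 q.2 p'.2 p'.1 hqn hq.2 h3 h4]
        exact hag p' (List.mem_cons_of_mem _ hp')
      exact ih (fun p' hp' => hps p' (List.mem_cons_of_mem _ hp'))
        (List.nodup_cons.mp hnd).2 _ hsh' hag' p hpmem

theorem pvPairs_bounds {n : Nat} : ∀ p ∈ pvPairs n, p.1 < p.2 ∧ p.2 < n := by
  intro p hp
  simp only [pvPairs, List.mem_flatMap, List.mem_map, List.mem_range] at hp
  obtain ⟨r, hr, k, hk, rfl⟩ := hp
  constructor <;> simp <;> omega

theorem pvPairs_nodup (n : Nat) : (pvPairs n).Nodup := by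
  rw [pvPairs, List.nodup_flatMap]
  constructor
  · intro r _
    exact (List.nodup_range).map (fun a b h => by simp [Prod.ext_iff] at h; omega)
  · exact List.pairwise_lt_range.imp (fun hab => by
      intro x hx hy
      simp only [List.mem_map, List.mem_range] at hx hy
      obtain ⟨k1, _, rfl⟩ := hx
      obtain ⟨k2, _, h2⟩ := hy
      simp [Prod.ext_iff] at h2
      omega)

theorem pvPairs_mem {n i j : Nat} (hij : i < j) (hj : j < n) : (i, j) ∈ pvPairs n := by
  simp only [pvPairs, List.mem_flatMap, List.mem_map, List.mem_range]
  exact ⟨i, by omega, ⟨j - i - 1, by omega, by simp; omega⟩⟩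

theorem pvA_eq_fold (bg : Int) (g : List (List Int)) (n : Nat) (hn : g.length = n) :
    (PySem.List.pyRange 0 (PySem.List.len g) 1).foldl
      (fun res r => (PySem.List.pyRange (r + 1) (PySem.List.len g) 1).foldl
        (fun res c => pvStep bg res r c) res)
      (g.map (fun row => PySem.List.slice row none none))
      = pvFold bg g (pvPairs n) := by
  have hcopy : (g.map fun row => PySem.List.slice row none none) = g := by
    simp [PySem.List.slice_none_none]
  rw [hcopy, PySem.List.len_eq, hn, PySem.List.pyRange_zero_nat, List.foldl_map,
      pvFold, pvPairs, List.foldl_flatMap]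
  apply PySem.List.foldl_congr_mem
  intro res r _
  have hrange : PySem.List.pyRange ((r : Int) + 1) (n : Int) 1
      = (List.range (n - (r + 1))).map (fun k => ((r + 1 + k : Nat) : Int)) := by
    rw [PySem.List.pyRange_one]
    have ht : ((n : Int) - ((r : Int) + 1)).toNat = n - (r + 1) := by omega
    rw [ht]
    exact List.map_congr_left (fun k _ => by push_cast; ring)
  rw [hrange, List.foldl_map, List.foldl_map]
  apply PySem.List.foldl_congr_mem
  intro res' k _
  exact pvStep_cast bg res' r (r + 1 + k)

theorem pvA_cells {n : Nat} (bg : Int) (g : List (List Int)) (hsh : pvShape n g)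
    (i j : Nat) (hi : i < n) (hj : j < n) :
    pvG (pvFold bg g (pvPairs n)) i j = pvF bg g i j := by
  rcases Nat.lt_trichotomy i j with hlt | rfl | hgt
  · exact (pvFold_main bg g (pvPairs n) pvPairs_bounds (pvPairs_nodup n) g hsh
      (fun p _ => ⟨rfl, rfl⟩) (i, j) (pvPairs_mem hlt hj)).1
  · rw [pvFold_untouched bg (pvPairs n) pvPairs_bounds g hsh i i
      (fun p hp => by have := pvPairs_bounds p hp; exact ⟨by omega, by omega⟩)]
    rw [pvF, if_neg (fun h => h.2 h.1)]
  · exact (pvFold_main bg g (pvPairs n) pvPairs_bounds (pvPairs_nodup n) g hsh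
      (fun p _ => ⟨rfl, rfl⟩) (j, i) (pvPairs_mem hgt hi)).2

theorem pvG_eq_getElem (res : List (List Int)) (i j : Nat)
    (h1 : i < res.length) (h2 : j < res[i].length) : pvG res i j = res[i][j] := by
  unfold pvG
  rw [show res.getD i [] = res[i] from by
        rw [List.getD_eq_getElem?_getD, List.getElem?_eq_getElem h1]; rfl,
      show res[i].getD j 0 = res[i][j] from by
        rw [List.getD_eq_getElem?_getD, List.getElem?_eq_getElem h2]; rfl]

theorem sym_diag_main_spec : Claim_equal_sym_diag_main := by
  intro g _ hpre
  unfold Spec_sym_diag_main sym_diag_main sym_diag_main_alt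
  by_cases hc : PySem.List.len g = PySem.List.len (g.headD [])
  · rw [← hc]
    simp only [ne_eq, not_true_eq_false, if_false, ite_not]
    -- square case
    set n := g.length with hn
    have hcn : (g.headD []).length = n := by
      have := hc
      rw [PySem.List.len_eq, PySem.List.len_eq] at this
      exact_mod_cast this.symm
    have hrows : ∀ row ∈ g, row.length = n := hpre.2.2 hcn.symm
    have hsh : pvShape n g := by
      refine ⟨rfl, fun k hk => ?_⟩
      rw [List.getD_eq_getElem?_getD, List.getElem?_eq_getElem hk, Option.getD_some]
      exact hrows _ (List.getElem_mem hk)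
    rw [pvA_eq_fold (pvBg g) g n rfl]
    have hshf := pvShape_fold (pvBg g) (pvPairs n) g hsh
    rw [PySem.List.len_eq, ← hn, PySem.List.pyRange_zero_nat, List.map_map]
    apply List.ext_getElem (by simp [hshf.1])
    intro i hA hB
    simp only [List.length_map, List.length_range] at hB
    have hrowlen : (pvFold (pvBg g) g (pvPairs n))[i].length = n := by
      have := hshf.2 i hB
      rwa [List.getD_eq_getElem?_getD, List.getElem?_eq_getElem hA, Option.getD_some] at this
    apply List.ext_getElem (by simp [hrowlen])
    intro j hA2 hB2
    rw [← pvG_eq_getElem _ _ _ hA hA2, pvA_cells (pvBg g) g hsh i j hB (by omega)]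
    simp only [List.getElem_map, List.getElem_range, Function.comp_apply]
    rw [pvGet2_cast g i j, pvGet2_cast g j i, pvF]
    by_cases hbg : pvG g i j = pvBg g
    · rw [if_pos hbg]
      by_cases h2 : pvG g j i = pvBg g
      · rw [if_neg (fun h => h.2 h2), hbg, h2]
      · rw [if_pos ⟨hbg, h2⟩]
    · rw [if_neg (fun h => hbg h.1), if_neg hbg]
  · have hne : ¬ (g.length = (g.head?.getD []).length) := by
      intro h
      apply hc
      rw [PySem.List.len_eq, PySem.List.len_eq, List.headD_eq_head?_getD, h]
    simp [hne]
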